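-- pv_equiv track=rewrite | github.com/nadine-ma/Thesis_interdependency_bias_fairness_instability_graph_recommenders | models/Tradeoff/utils.py | create_dicts
-- ===== SOURCE A (Python) =====
-- def create_dicts(pairs):
--     item_dict = {}
--     user_dict = {}
--     for (user, item, rating) in pairs:
--         if item not in item_dict:
--             item_dict[item] = [user]
--         else:
--             item_dict[item].append(user)
--
--         if user not in user_dict:
--             user_dict[user] = [item]
--         else:
--             user_dict[user].append(item)
--     return user_dict, item_dict
-- ===== SOURCE B (Python) =====
-- def _group(kvs):
--     keys = list(dict.fromkeys(k for k, _ in kvs))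
--     return {k: [v for k2, v in kvs if k2 == k] for k in keys}
--
--
-- def create_dicts(pairs):
--     user_dict = _group([(u, i) for (u, i, _r) in pairs])
--     item_dict = _group([(i, u) for (u, i, _r) in pairs])
--     return user_dict, item_dict
-- ===== Notes on version B (the rewrite author's own statement) =====
-- stated objective: alternative
-- what changed: Replaces the single incremental insert-or-append pass over two dicts with a declarative group-by: for each projection (user,item) and (item,user), collect the first-occurrence-ordered distinct keys and build each group's value list by a filtering scan per key.
import Mathlib
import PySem

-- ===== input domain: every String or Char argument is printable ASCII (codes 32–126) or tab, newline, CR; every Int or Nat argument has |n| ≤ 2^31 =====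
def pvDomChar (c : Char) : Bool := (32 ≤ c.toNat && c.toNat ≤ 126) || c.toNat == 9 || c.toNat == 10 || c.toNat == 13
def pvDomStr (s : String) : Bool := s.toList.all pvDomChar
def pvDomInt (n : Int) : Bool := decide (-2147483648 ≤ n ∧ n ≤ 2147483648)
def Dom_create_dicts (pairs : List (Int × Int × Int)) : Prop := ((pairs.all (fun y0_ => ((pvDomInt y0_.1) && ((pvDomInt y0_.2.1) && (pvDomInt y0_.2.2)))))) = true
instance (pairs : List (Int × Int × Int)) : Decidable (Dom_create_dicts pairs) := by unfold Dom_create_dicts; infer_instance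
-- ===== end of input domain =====

-- B rebuilds each dict by a declarative group-by (first-occurrence key order, per-key filtering scan) instead of A's single incremental insert-or-append pass; return value only (neither mutates its argument).


-- ===== PORT A =====
-- one pass over pairs, carrying (item_dict, user_dict); insert-or-append exactly as A's if/else
def pvStepA (d : PySem.Dict Int (List Int)) (q : Int × Int) : PySem.Dict Int (List Int) :=
  if d.contains q.1 then d.insert q.1 (d.getD q.1 [] ++ [q.2]) else d.insert q.1 [q.2]

def create_dicts (pairs : List (Int × Int × Int)) : (List (Int × List Int)) × (List (Int × List Int)) :=
  let st := pairs.foldl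
    (fun (s : PySem.Dict Int (List Int) × PySem.Dict Int (List Int)) p =>
      (pvStepA s.1 (p.2.1, p.1), pvStepA s.2 (p.1, p.2.1)))
    (PySem.Dict.empty, PySem.Dict.empty)
  (st.2.items, st.1.items)

-- ===== PORT B =====
-- group-by: distinct keys in first-occurrence order, each mapped to the filtered values
def pvGroup (kvs : List (Int × Int)) : List (Int × List Int) :=
  (PySem.List.dedup (kvs.map (fun q => q.1))).map
    (fun k => (k, (kvs.filter (fun q => q.1 == k)).map (fun q => q.2)))

def create_dicts_alt (pairs : List (Int × Int × Int)) : (List (Int × List Int)) × (List (Int × List Int)) :=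
  (pvGroup (pairs.map (fun p => (p.1, p.2.1))), pvGroup (pairs.map (fun p => (p.2.1, p.1))))

-- ===== PRECONDITION & SPEC =====
def Spec_create_dicts (pairs : List (Int × Int × Int)) (out : (List (Int × List Int)) × (List (Int × List Int))) : Prop := out = create_dicts_alt pairs
instance (pairs : List (Int × Int × Int)) (out : (List (Int × List Int)) × (List (Int × List Int))) : Decidable (Spec_create_dicts pairs out) := by unfold Spec_create_dicts; infer_instance

-- ===== CLAIM (what is proved, stated in full; the proofs are below) =====
def Claim_equal_create_dicts : Prop := ∀ (pairs : List (Int × Int × Int)), Dom_create_dicts pairs → Spec_create_dicts pairs (create_dicts pairs)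

-- ===== LEMMAS AND PROOFS =====

-- A's if/else step is exactly Dict.modify with default []
theorem pvStepA_eq_modify (d : PySem.Dict Int (List Int)) (q : Int × Int) :
    pvStepA d q = d.modify q.1 [] (fun x => x ++ [q.2]) := by
  unfold pvStepA PySem.Dict.modify
  by_cases h : d.contains q.1 = true
  · simp [h]
  · simp [h, PySem.Dict.getD_of_not_contains]

-- the insert-or-append fold over kv pairs produces exactly the group-by association list
theorem foldl_stepA_items (l : List (Int × Int)) :
    (l.foldl pvStepA PySem.Dict.empty).items = pvGroup l := by
  have hmod : pvStepA = fun (d : PySem.Dict Int (List Int)) (q : Int × Int) => d.modify q.1 [] (fun x => x ++ [q.2]) := by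
    funext d q
    exact pvStepA_eq_modify d q
  rw [hmod]
  have hnd : (l.foldl (fun d q => d.modify q.1 [] (fun x => x ++ [q.2])) (PySem.Dict.empty : PySem.Dict Int (List Int))).keys.Nodup := by
    have := PySem.Dict.nodup_keys_foldl_modify_key l (fun q => q.1) []
      (fun _ q => fun x => x ++ [q.2]) PySem.Dict.empty (by simp)
    simpa using this
  rw [PySem.Dict.items_eq_map_keys _ hnd []]
  have hkeys : (l.foldl (fun d q => d.modify q.1 [] (fun x => x ++ [q.2])) (PySem.Dict.empty : PySem.Dict Int (List Int))).keys
      = PySem.Set.ofList (l.map (fun q => q.1)) := by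
    have := PySem.Dict.keys_foldl_modify_key l (fun q => q.1) []
      (fun _ q => fun x => x ++ [q.2]) PySem.Dict.empty
    simpa [PySem.Set.update_nil_left] using this
  rw [hkeys]
  unfold pvGroup
  rw [PySem.List.dedup_eq_ofList]
  apply List.map_congr_left
  intro k _
  have := PySem.Dict.getD_foldl_modify_append l (PySem.Dict.empty : PySem.Dict Int (List Int)) k
  simp only [PySem.Dict.getD_empty, List.nil_append] at this
  simp [this]

-- ===== VERDICT (by name: the statement is the Claim_ definition above) =====
theorem create_dicts_spec : Claim_equal_create_dicts := by
  intro pairs _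
  unfold Spec_create_dicts create_dicts create_dicts_alt
  dsimp only
  rw [PySem.List.foldl_prod_mk (fun d (p : Int × Int × Int) => pvStepA d (p.2.1, p.1)) (fun d p => pvStepA d (p.1, p.2.1)) pairs PySem.Dict.empty PySem.Dict.empty]
  have h1 : pairs.foldl (fun d p => pvStepA d (p.2.1, p.1)) PySem.Dict.empty
      = (pairs.map (fun p => (p.2.1, p.1))).foldl pvStepA PySem.Dict.empty := by
    rw [List.foldl_map]
  have h2 : pairs.foldl (fun d p => pvStepA d (p.1, p.2.1)) PySem.Dict.empty
      = (pairs.map (fun p => (p.1, p.2.1))).foldl pvStepA PySem.Dict.empty := by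
    rw [List.foldl_map]
  simp only [h1, h2, foldl_stepA_items]
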